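-- pv_equiv track=rewrite | github.com/WachirananNot/229223-Programming-For-Data-Science | Quiz2/Quiz2_1_630510642.py | multiple_mn
-- ===== SOURCE A (Python) =====
-- def multiple_mn(m,n):
--     out_ = []
--     for i in range(1,m+1):
--         in_ = []
--         for j in range(1,n+1):
--             if i == 1 or i == m:
--                 in_.append(1)
--             elif j == 1 or j == n:
--                 in_.append(1)
--             else:
--                 in_.append(0)
--         out_.append(in_)
--     return(out_)
-- ===== SOURCE B (Python) =====
-- def multiple_mn(m, n):
--     grid = [[0] * n for _ in range(m)]
--     if m > 0 and n > 0:
--         grid[0] = [1] * n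
--         grid[-1] = [1] * n
--         for row in grid:
--             row[0] = 1
--             row[-1] = 1
--     return grid
-- ===== Notes on version B (the rewrite author's own statement) =====
-- stated objective: simpler
-- what changed: B allocates an all-zero m×n grid in one comprehension and then paints the border in separate passes (replace first/last row with all-ones, set each row's first/last cell), instead of A's nested loops deciding 1 vs 0 per cell with an if/elif chain.
import Mathlib
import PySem

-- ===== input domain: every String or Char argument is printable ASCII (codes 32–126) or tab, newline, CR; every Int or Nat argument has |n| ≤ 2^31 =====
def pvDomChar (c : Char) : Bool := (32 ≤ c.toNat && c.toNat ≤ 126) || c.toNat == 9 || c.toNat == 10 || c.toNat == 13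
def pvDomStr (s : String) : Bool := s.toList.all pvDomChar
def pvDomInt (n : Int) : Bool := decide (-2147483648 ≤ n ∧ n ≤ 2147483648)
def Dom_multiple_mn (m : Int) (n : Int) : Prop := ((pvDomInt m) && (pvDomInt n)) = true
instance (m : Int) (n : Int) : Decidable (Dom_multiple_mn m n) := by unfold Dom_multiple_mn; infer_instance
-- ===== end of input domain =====

-- B builds the all-zero grid first and then paints the border (first/last row, row ends) in
-- separate passes, replacing A's per-cell if/elif decision; objective: simpler decomposition.


-- ===== PORT A =====
-- literal transliteration of A: two nested loops appending a per-cell 1/0 chosen by the if/elif chain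
def multiple_mn (m : Int) (n : Int) : List (List Int) :=
  (PySem.List.pyRange 1 (m + 1) 1).foldl (fun out_ i =>
    out_ ++ [(PySem.List.pyRange 1 (n + 1) 1).foldl (fun in_ j =>
      in_ ++ [if i = 1 ∨ i = m then (1 : Int)
              else if j = 1 ∨ j = n then 1
              else 0]) []]) []

-- ===== PORT B =====
-- row[0] = 1; row[-1] = 1  (the in-place border paint of one row)
def pvPaintRow (row : List Int) : List Int :=
  PySem.List.pySetD (PySem.List.pySetD row 0 1) (-1) 1

-- literal transliteration of B: allocate zeros, overwrite first/last row, paint every row's ends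
def multiple_mn_alt (m : Int) (n : Int) : List (List Int) :=
  let grid := (PySem.List.pyRange 0 m 1).map (fun _ => List.replicate n.toNat (0 : Int))
  if 0 < m ∧ 0 < n then
    let grid := PySem.List.pySetD grid 0 (List.replicate n.toNat (1 : Int))
    let grid := PySem.List.pySetD grid (-1) (List.replicate n.toNat (1 : Int))
    grid.map pvPaintRow
  else grid

-- ===== PRECONDITION & SPEC =====
def Spec_multiple_mn (m : Int) (n : Int) (out : List (List Int)) : Prop := out = multiple_mn_alt m n
instance (m : Int) (n : Int) (out : List (List Int)) : Decidable (Spec_multiple_mn m n out) := by unfold Spec_multiple_mn; infer_instance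

-- ===== CLAIM (what is proved, stated in full; the proofs are below) =====
def Claim_equal_multiple_mn : Prop := ∀ (m : Int) (n : Int), Dom_multiple_mn m n → Spec_multiple_mn m n (multiple_mn m n)

-- ===== LEMMAS AND PROOFS =====

lemma pySetD_neg_one {α : Type} (xs : List α) (v : α) (h : xs ≠ []) :
    PySem.List.pySetD xs (-1) v = xs.set (xs.length - 1) v := by
  have hl : xs.length ≠ 0 := by simpa using h
  unfold PySem.List.pySetD PySem.List.pySet? PySem.List.pyIdx?
  rw [if_neg (by omega), if_pos (by omega)]
  simp

lemma pyRange_one_eq' (a b : Int) :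
    PySem.List.pyRange a b 1 = (List.range (b - a).toNat).map (fun k : Nat => a + (k : Int)) := by
  generalize hd : (b - a).toNat = d
  induction d generalizing a with
  | zero =>
      have h : ¬ a < b := by omega
      simp [PySem.List.pyRange]
      omega
  | succ d ih =>
      have hab : a < b := by omega
      rw [PySem.List.pyRange_one_cons hab, ih (a + 1) (by omega), List.range_succ_eq_map]
      simp only [List.map_cons, List.map_map, Nat.cast_zero, add_zero, List.cons.injEq, true_and]
      apply List.map_congr_left
      intro k _
      simp [Function.comp]
      ring

lemma pvPaintRow_eq (r : List Int) (h : r ≠ []) :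
    pvPaintRow r = (r.set 0 1).set (r.length - 1) 1 := by
  unfold pvPaintRow
  rw [PySem.List.pySetD_of_nonneg (i := 0) r 1 (by norm_num)]
  rw [pySetD_neg_one _ _ (by simpa using h)]
  simp

lemma multiple_mn_alt_eq (m n : Int) (hm : 0 < m) (hn : 0 < n) :
    multiple_mn_alt m n =
      (((List.replicate m.toNat (List.replicate n.toNat (0:Int))).set 0
          (List.replicate n.toNat 1)).set (m.toNat - 1) (List.replicate n.toNat 1)).map pvPaintRow := by
  unfold multiple_mn_alt
  simp only [if_pos (And.intro hm hn)]
  have h1 : (PySem.List.pyRange 0 m 1).map (fun _ => List.replicate n.toNat (0 : Int))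
      = List.replicate m.toNat (List.replicate n.toNat (0:Int)) := by
    rw [pyRange_one_eq']
    apply List.ext_getElem <;> simp
  rw [h1]
  rw [PySem.List.pySetD_of_nonneg (i := 0) _ _ (by norm_num)]
  rw [pySetD_neg_one _ _ (by simp; omega)]
  simp

lemma multiple_mn_eq_map (m n : Int) :
    multiple_mn m n
    = (List.range m.toNat).map (fun i : Nat =>
      (List.range n.toNat).map (fun j : Nat =>
        if (1 + (i : Int)) = 1 ∨ (1 + (i : Int)) = m then (1 : Int)
        else if (1 + (j : Int)) = 1 ∨ (1 + (j : Int)) = n then 1 else 0)) := by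
  unfold multiple_mn
  simp only [PySem.List.foldl_append_singleton_eq_map, List.nil_append, pyRange_one_eq']
  have hm : (m + 1 - 1).toNat = m.toNat := by omega
  have hn : (n + 1 - 1).toNat = n.toNat := by omega
  rw [hm, hn]
  simp [List.map_map, Function.comp]

-- ===== VERDICT (by name: the statement is the Claim_ definition above) =====
theorem multiple_mn_spec : Claim_equal_multiple_mn := by
  intro m n _
  unfold Spec_multiple_mn
  rw [multiple_mn_eq_map]
  by_cases hmn : 0 < m ∧ 0 < n
  · obtain ⟨hm, hn⟩ := hmn
    rw [multiple_mn_alt_eq m n hm hn]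
    have hm1 : 0 < m.toNat := by omega
    have hn1 : 0 < n.toNat := by omega
    apply List.ext_getElem
    · simp
    · intro i h1 h2
      simp only [List.length_map, List.length_set, List.length_replicate, List.length_range] at h1 h2
      simp only [List.getElem_map, List.getElem_set, List.getElem_replicate, List.getElem_range]
      by_cases hib : (1 + (i : Int)) = 1 ∨ (1 + (i : Int)) = m
      · have hib' : i = 0 ∨ i = m.toNat - 1 := by rcases hib with h | h <;> omega
        have hones : (if m.toNat - 1 = i then List.replicate n.toNat (1:Int)
            else if 0 = i then List.replicate n.toNat 1 else List.replicate n.toNat 0)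
            = List.replicate n.toNat 1 := by
          split_ifs with hA hB
          · rfl
          · rfl
          · exfalso
            omega
        rw [hones, pvPaintRow_eq _ (by simp; omega)]
        have hall : ∀ j ∈ List.range n.toNat,
            (if (1 : Int) + (i : Int) = 1 ∨ 1 + (i : Int) = m then (1:Int)
             else if (1 : Int) + (j : Int) = 1 ∨ 1 + (j : Int) = n then 1 else 0) = 1 := by
          intro j _
          rw [if_pos hib]
        rw [List.map_congr_left hall, List.map_const']
        simp [List.set_replicate_self]
      · have hzeros : (if m.toNat - 1 = i then List.replicate n.toNat (1:Int)
            else if 0 = i then List.replicate n.toNat 1 else List.replicate n.toNat 0)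
            = List.replicate n.toNat 0 := by
          split_ifs with hA hB
          · exfalso
            apply hib
            right
            omega
          · exfalso
            apply hib
            left
            omega
          · rfl
        rw [hzeros, pvPaintRow_eq _ (by simp; omega)]
        apply List.ext_getElem
        · simp
        · intro j j1 j2
          simp only [List.getElem_map, List.getElem_set, List.getElem_replicate, List.getElem_range]
          rw [if_neg hib]
          simp only [List.length_map, List.length_range, List.length_set,
            List.length_replicate] at j1 j2
          simp only [List.length_replicate]
          split_ifs <;> omega
  · unfold multiple_mn_alt
    rw [if_neg hmn, pyRange_one_eq']
    rcases (by omega : m ≤ 0 ∨ (0 < m ∧ n ≤ 0)) with hm | ⟨hm, hn⟩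
    · have h0 : m.toNat = 0 := by omega
      simp [h0]
    · have h0 : n.toNat = 0 := by omega
      simp [h0]
      apply List.ext_getElem <;> simp
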